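-- pv_equiv track=rewrite | github.com/finlaymcnally/RecipeImporter | cookimport/staging/stage_block_predictions.py | _resolve_block_label
-- ===== SOURCE A (Python) =====
-- _LABEL_RESOLUTION_PRIORITY: tuple[str, ...] = (
--     "RECIPE_VARIANT",
--     "RECIPE_TITLE",
--     "YIELD_LINE",
--     "TIME_LINE",
--     "HOWTO_SECTION",
--     "INGREDIENT_LINE",
--     "RECIPE_NOTES",
--     "INSTRUCTION_LINE",
--     "KNOWLEDGE",
-- )
--
-- _RECIPE_LOCAL_LABELS: set[str] = {
--     "RECIPE_TITLE",
--     "INGREDIENT_LINE",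
--     "INSTRUCTION_LINE",
--     "HOWTO_SECTION",
--     "YIELD_LINE",
--     "TIME_LINE",
--     "RECIPE_NOTES",
--     "RECIPE_VARIANT",
-- }
--
-- def _resolve_block_label(labels: list[str]) -> str:
--     if not labels:
--         return "OTHER"
--
--     label_set = set(labels)
--     if "KNOWLEDGE" in label_set and any(
--         recipe_label in label_set for recipe_label in _RECIPE_LOCAL_LABELS
--     ):
--         label_set.remove("KNOWLEDGE")
--
--     for label in _LABEL_RESOLUTION_PRIORITY:
--         if label in label_set:
--             return label
--     return "OTHER"
-- ===== SOURCE B (Python) =====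
-- _LABEL_RESOLUTION_PRIORITY: tuple[str, ...] = (
--     "RECIPE_VARIANT",
--     "RECIPE_TITLE",
--     "YIELD_LINE",
--     "TIME_LINE",
--     "HOWTO_SECTION",
--     "INGREDIENT_LINE",
--     "RECIPE_NOTES",
--     "INSTRUCTION_LINE",
--     "KNOWLEDGE",
-- )
--
-- _LABEL_INDEX: dict[str, int] = {
--     label: i for i, label in enumerate(_LABEL_RESOLUTION_PRIORITY)
-- }
--
--
-- def _resolve_block_label(labels: list[str]) -> str:
--     # One pass over `labels`, keeping the smallest priority index seen.
--     # The KNOWLEDGE-removal step of the original is a no-op for the result: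
--     # every recipe-local label outranks KNOWLEDGE in the priority order.
--     best = None
--     for label in labels:
--         i = _LABEL_INDEX.get(label)
--         if i is not None and (best is None or i < best):
--             best = i
--     return _LABEL_RESOLUTION_PRIORITY[best] if best is not None else "OTHER"
-- ===== Notes on version B (the rewrite author's own statement) =====
-- stated objective: simpler
-- what changed: Replaces set construction, the KNOWLEDGE-removal step (a provable no-op) and the scan over the priority tuple by a precomputed label->index dict and a single min-index pass over the input labels.
import Mathlib
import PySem

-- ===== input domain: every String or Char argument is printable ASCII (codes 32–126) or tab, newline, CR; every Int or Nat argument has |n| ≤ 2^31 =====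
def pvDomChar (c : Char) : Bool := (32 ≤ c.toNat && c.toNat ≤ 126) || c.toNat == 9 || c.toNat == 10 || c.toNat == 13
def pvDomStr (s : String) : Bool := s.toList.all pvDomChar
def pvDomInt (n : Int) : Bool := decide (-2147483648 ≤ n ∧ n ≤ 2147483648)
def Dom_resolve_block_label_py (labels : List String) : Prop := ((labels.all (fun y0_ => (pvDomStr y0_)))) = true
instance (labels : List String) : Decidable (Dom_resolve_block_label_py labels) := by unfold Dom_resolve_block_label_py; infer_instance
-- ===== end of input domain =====

-- B replaces A's set construction, KNOWLEDGE-removal step (a provable no-op) and scan over the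
-- priority tuple by a precomputed label->index dict and a single min-index pass over the labels.

-- ===== PORT A =====
def pvPriority : List String :=
  ["RECIPE_VARIANT", "RECIPE_TITLE", "YIELD_LINE", "TIME_LINE", "HOWTO_SECTION",
   "INGREDIENT_LINE", "RECIPE_NOTES", "INSTRUCTION_LINE", "KNOWLEDGE"]

def pvRecipeLocal : PySem.Set String :=
  PySem.Set.ofList ["RECIPE_TITLE", "INGREDIENT_LINE", "INSTRUCTION_LINE", "HOWTO_SECTION",
                    "YIELD_LINE", "TIME_LINE", "RECIPE_NOTES", "RECIPE_VARIANT"]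

-- the KNOWLEDGE-removal block of A; `remove` cannot raise here (membership is checked by the
-- guard, so `remove?` is `some` and the `.getD s` default is never used)
def pvAFilter (s : PySem.Set String) : PySem.Set String :=
  if ("KNOWLEDGE" ∈ s) ∧ (pvRecipeLocal.any (fun r => decide (r ∈ s)) = true) then
    (PySem.Set.remove? s "KNOWLEDGE").getD s
  else s

-- A's `for label in _LABEL_RESOLUTION_PRIORITY: if label in label_set: return label` / `return "OTHER"`
def pvAScan (s : PySem.Set String) : String :=
  (pvPriority.find? (fun l => decide (l ∈ s))).getD "OTHER"

def resolve_block_label_py (labels : List String) : String :=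
  if labels = [] then "OTHER"
  else pvAScan (pvAFilter (PySem.Set.ofList labels))

-- ===== PORT B =====
-- {label: i for i, label in enumerate(_LABEL_RESOLUTION_PRIORITY)}
def pvLabelIndex : PySem.Dict String Int :=
  (PySem.List.enumerate pvPriority 0).foldl (fun d p => d.insert p.2 p.1) PySem.Dict.empty

-- the loop body of B
def pvStep (best : Option Int) (label : String) : Option Int :=
  match pvLabelIndex.get? label with
  | none => best
  | some i =>
    match best with
    | none => some i
    | some b => if i < b then some i else best

def resolve_block_label_py_alt (labels : List String) : String :=
  match labels.foldl pvStep none with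
  | some i => (PySem.List.pyGet? pvPriority i).getD "OTHER"  -- best is always in range; default unused
  | none => "OTHER"

-- ===== PRECONDITION & SPEC =====
def Spec_resolve_block_label_py (labels : List String) (out : String) : Prop := out = resolve_block_label_py_alt labels
instance (labels : List String) (out : String) : Decidable (Spec_resolve_block_label_py labels out) := by unfold Spec_resolve_block_label_py; infer_instance

-- ===== CLAIM (what is proved, stated in full; the proofs are below) =====
def Claim_equal_resolve_block_label_py : Prop := ∀ (labels : List String), Dom_resolve_block_label_py labels → Spec_resolve_block_label_py labels (resolve_block_label_py labels)

-- ===== LEMMAS AND PROOFS =====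

-- the indices (in priority order) of the labels of the input
def pvIds (labels : List String) : List Int := labels.filterMap (fun l => pvLabelIndex.get? l)

-- interpretation of B's final line
def pvF : Option Int → String
  | some i => (PySem.List.pyGet? pvPriority i).getD "OTHER"
  | none => "OTHER"

-- the priority cascade as a membership chain over the raw input list
def pvChain (labels : List String) : String :=
  if "RECIPE_VARIANT" ∈ labels then "RECIPE_VARIANT"
  else if "RECIPE_TITLE" ∈ labels then "RECIPE_TITLE"
  else if "YIELD_LINE" ∈ labels then "YIELD_LINE"
  else if "TIME_LINE" ∈ labels then "TIME_LINE"
  else if "HOWTO_SECTION" ∈ labels then "HOWTO_SECTION"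
  else if "INGREDIENT_LINE" ∈ labels then "INGREDIENT_LINE"
  else if "RECIPE_NOTES" ∈ labels then "RECIPE_NOTES"
  else if "INSTRUCTION_LINE" ∈ labels then "INSTRUCTION_LINE"
  else if "KNOWLEDGE" ∈ labels then "KNOWLEDGE"
  else "OTHER"

theorem pvLabelIndex_eq :
    pvLabelIndex = { items := [("RECIPE_VARIANT", 0), ("RECIPE_TITLE", 1), ("YIELD_LINE", 2),
      ("TIME_LINE", 3), ("HOWTO_SECTION", 4), ("INGREDIENT_LINE", 5), ("RECIPE_NOTES", 6),
      ("INSTRUCTION_LINE", 7), ("KNOWLEDGE", 8)] } := rfl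

theorem pv_g_charac (l : String) (i : Int) (h : pvLabelIndex.get? l = some i) :
    (l = "RECIPE_VARIANT" ∧ i = 0) ∨ (l = "RECIPE_TITLE" ∧ i = 1) ∨ (l = "YIELD_LINE" ∧ i = 2) ∨
    (l = "TIME_LINE" ∧ i = 3) ∨ (l = "HOWTO_SECTION" ∧ i = 4) ∨ (l = "INGREDIENT_LINE" ∧ i = 5) ∨
    (l = "RECIPE_NOTES" ∧ i = 6) ∨ (l = "INSTRUCTION_LINE" ∧ i = 7) ∨ (l = "KNOWLEDGE" ∧ i = 8) := by
  rw [pvLabelIndex_eq] at h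
  simp only [PySem.Dict.get?_mk_cons] at h
  split_ifs at h with h0 h1 h2 h3 h4 h5 h6 h7 h8
  · exact Or.inl ⟨(eq_of_beq h0).symm, (Option.some.inj h).symm⟩
  · exact Or.inr (Or.inl ⟨(eq_of_beq h1).symm, (Option.some.inj h).symm⟩)
  · exact Or.inr (Or.inr (Or.inl ⟨(eq_of_beq h2).symm, (Option.some.inj h).symm⟩))
  · exact Or.inr (Or.inr (Or.inr (Or.inl ⟨(eq_of_beq h3).symm, (Option.some.inj h).symm⟩)))
  · exact Or.inr (Or.inr (Or.inr (Or.inr (Or.inl ⟨(eq_of_beq h4).symm, (Option.some.inj h).symm⟩))))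
  · exact Or.inr (Or.inr (Or.inr (Or.inr (Or.inr (Or.inl ⟨(eq_of_beq h5).symm, (Option.some.inj h).symm⟩)))))
  · exact Or.inr (Or.inr (Or.inr (Or.inr (Or.inr (Or.inr (Or.inl ⟨(eq_of_beq h6).symm, (Option.some.inj h).symm⟩))))))
  · exact Or.inr (Or.inr (Or.inr (Or.inr (Or.inr (Or.inr (Or.inr (Or.inl ⟨(eq_of_beq h7).symm, (Option.some.inj h).symm⟩)))))))
  · exact Or.inr (Or.inr (Or.inr (Or.inr (Or.inr (Or.inr (Or.inr (Or.inr ⟨(eq_of_beq h8).symm, (Option.some.inj h).symm⟩)))))))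
  · simp [PySem.Dict.get?] at h

theorem pv_g_at (k : Nat) (hk : k < 9) :
    pvLabelIndex.get? (pvPriority.getD k "") = some (k : Int) := by
  interval_cases k <;> rfl

theorem pv_fold_some (labels : List String) :
    ∀ x : Int, labels.foldl pvStep (some x) = some ((pvIds labels).foldl min x) := by
  induction labels with
  | nil => intro x; rfl
  | cons l ls ih =>
    intro x
    cases h : pvLabelIndex.get? l with
    | none => simp [pvIds, h, pvStep, ih x, List.foldl_cons]
    | some i =>
      have hstep : pvStep (some x) l = some (min x i) := by
        simp only [pvStep, h]
        rcases lt_or_ge i x with hc | hc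
        · rw [if_pos hc, min_eq_right (le_of_lt hc)]
        · rw [if_neg (not_lt.mpr hc), min_eq_left hc]
      simp [pvIds, h, List.foldl_cons, hstep, ih (min x i)]

theorem pv_fold_none (labels : List String) :
    labels.foldl pvStep none = (pvIds labels).min? := by
  induction labels with
  | nil => rfl
  | cons l ls ih =>
    cases h : pvLabelIndex.get? l with
    | none => simp [pvIds, h, pvStep, ih, List.foldl_cons]
    | some i =>
      have : pvStep none l = some i := by simp [pvStep, h]
      simp only [List.foldl_cons, this, pv_fold_some ls i, pvIds, List.filterMap_cons, h]
      rfl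

theorem pv_alt_eq (labels : List String) :
    resolve_block_label_py_alt labels = pvF ((pvIds labels).min?) := by
  unfold resolve_block_label_py_alt
  rw [pv_fold_none]
  cases (pvIds labels).min? <;> rfl

theorem pv_bound (labels : List String) (k j : Nat)
    (hl : pvPriority.getD j "" ∈ labels)
    (hlow : ∀ j', j' < k → pvPriority.getD j' "" ∉ labels) : (k : Int) ≤ (j : Int) := by
  rcases Nat.lt_or_ge j k with hc | hc
  · exact absurd hl (hlow j hc)
  · exact_mod_cast hc

theorem pv_minIds (labels : List String) (k : Nat) (hk : k < 9)
    (hmem : pvPriority.getD k "" ∈ labels)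
    (hlow : ∀ j, j < k → pvPriority.getD j "" ∉ labels) :
    (pvIds labels).min? = some (k : Int) := by
  rw [List.min?_eq_some_iff]
  refine ⟨List.mem_filterMap.mpr ⟨_, hmem, pv_g_at k hk⟩, ?_⟩
  intro b hb
  obtain ⟨l, hl, hgl⟩ := List.mem_filterMap.mp hb
  rcases pv_g_charac l b hgl with ⟨rfl, rfl⟩ | ⟨rfl, rfl⟩ | ⟨rfl, rfl⟩ | ⟨rfl, rfl⟩ |
    ⟨rfl, rfl⟩ | ⟨rfl, rfl⟩ | ⟨rfl, rfl⟩ | ⟨rfl, rfl⟩ | ⟨rfl, rfl⟩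
  · exact_mod_cast pv_bound labels k 0 hl hlow
  · exact_mod_cast pv_bound labels k 1 hl hlow
  · exact_mod_cast pv_bound labels k 2 hl hlow
  · exact_mod_cast pv_bound labels k 3 hl hlow
  · exact_mod_cast pv_bound labels k 4 hl hlow
  · exact_mod_cast pv_bound labels k 5 hl hlow
  · exact_mod_cast pv_bound labels k 6 hl hlow
  · exact_mod_cast pv_bound labels k 7 hl hlow
  · exact_mod_cast pv_bound labels k 8 hl hlow

theorem pv_ids_nil (labels : List String)
    (h0 : "RECIPE_VARIANT" ∉ labels) (h1 : "RECIPE_TITLE" ∉ labels) (h2 : "YIELD_LINE" ∉ labels)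
    (h3 : "TIME_LINE" ∉ labels) (h4 : "HOWTO_SECTION" ∉ labels) (h5 : "INGREDIENT_LINE" ∉ labels)
    (h6 : "RECIPE_NOTES" ∉ labels) (h7 : "INSTRUCTION_LINE" ∉ labels) (h8 : "KNOWLEDGE" ∉ labels) :
    pvIds labels = [] := by
  refine List.filterMap_eq_nil_iff.mpr ?_
  intro l hl
  cases hg : pvLabelIndex.get? l with
  | none => rfl
  | some i =>
    rcases pv_g_charac l i hg with ⟨rfl, _⟩ | ⟨rfl, _⟩ | ⟨rfl, _⟩ | ⟨rfl, _⟩ |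
      ⟨rfl, _⟩ | ⟨rfl, _⟩ | ⟨rfl, _⟩ | ⟨rfl, _⟩ | ⟨rfl, _⟩
    · exact absurd hl h0
    · exact absurd hl h1
    · exact absurd hl h2
    · exact absurd hl h3
    · exact absurd hl h4
    · exact absurd hl h5
    · exact absurd hl h6
    · exact absurd hl h7
    · exact absurd hl h8

theorem pv_chain_eq (labels : List String) : pvChain labels = pvF ((pvIds labels).min?) := by
  unfold pvChain
  split_ifs with h0 h1 h2 h3 h4 h5 h6 h7 h8
  · rw [pv_minIds labels 0 (by omega) h0 (fun j hj => absurd hj (Nat.not_lt_zero j))]; rfl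
  · rw [pv_minIds labels 1 (by omega) h1 (by intro j hj; interval_cases j; exact h0)]; rfl
  · rw [pv_minIds labels 2 (by omega) h2 (by intro j hj; interval_cases j <;> assumption)]; rfl
  · rw [pv_minIds labels 3 (by omega) h3 (by intro j hj; interval_cases j <;> assumption)]; rfl
  · rw [pv_minIds labels 4 (by omega) h4 (by intro j hj; interval_cases j <;> assumption)]; rfl
  · rw [pv_minIds labels 5 (by omega) h5 (by intro j hj; interval_cases j <;> assumption)]; rfl
  · rw [pv_minIds labels 6 (by omega) h6 (by intro j hj; interval_cases j <;> assumption)]; rfl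
  · rw [pv_minIds labels 7 (by omega) h7 (by intro j hj; interval_cases j <;> assumption)]; rfl
  · rw [pv_minIds labels 8 (by omega) h8 (by intro j hj; interval_cases j <;> assumption)]; rfl
  · rw [pv_ids_nil labels h0 h1 h2 h3 h4 h5 h6 h7 h8]; rfl

theorem pv_scan_eq (s : PySem.Set String) :
    pvAScan s =
      if "RECIPE_VARIANT" ∈ s then "RECIPE_VARIANT"
      else if "RECIPE_TITLE" ∈ s then "RECIPE_TITLE"
      else if "YIELD_LINE" ∈ s then "YIELD_LINE"
      else if "TIME_LINE" ∈ s then "TIME_LINE"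
      else if "HOWTO_SECTION" ∈ s then "HOWTO_SECTION"
      else if "INGREDIENT_LINE" ∈ s then "INGREDIENT_LINE"
      else if "RECIPE_NOTES" ∈ s then "RECIPE_NOTES"
      else if "INSTRUCTION_LINE" ∈ s then "INSTRUCTION_LINE"
      else if "KNOWLEDGE" ∈ s then "KNOWLEDGE"
      else "OTHER" := by
  by_cases h0 : "RECIPE_VARIANT" ∈ s
  · simp [pvAScan, pvPriority, h0]
  by_cases h1 : "RECIPE_TITLE" ∈ s
  · simp [pvAScan, pvPriority, List.find?, h0, h1]
  by_cases h2 : "YIELD_LINE" ∈ s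
  · simp [pvAScan, pvPriority, List.find?, h0, h1, h2]
  by_cases h3 : "TIME_LINE" ∈ s
  · simp [pvAScan, pvPriority, List.find?, h0, h1, h2, h3]
  by_cases h4 : "HOWTO_SECTION" ∈ s
  · simp [pvAScan, pvPriority, List.find?, h0, h1, h2, h3, h4]
  by_cases h5 : "INGREDIENT_LINE" ∈ s
  · simp [pvAScan, pvPriority, List.find?, h0, h1, h2, h3, h4, h5]
  by_cases h6 : "RECIPE_NOTES" ∈ s
  · simp [pvAScan, pvPriority, List.find?, h0, h1, h2, h3, h4, h5, h6]
  by_cases h7 : "INSTRUCTION_LINE" ∈ s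
  · simp [pvAScan, pvPriority, List.find?, h0, h1, h2, h3, h4, h5, h6, h7]
  by_cases h8 : "KNOWLEDGE" ∈ s
  · simp [pvAScan, pvPriority, List.find?, h0, h1, h2, h3, h4, h5, h6, h7, h8]
  · simp [pvAScan, pvPriority, List.find?, h0, h1, h2, h3, h4, h5, h6, h7, h8]

theorem pv_A_eq_chain (labels : List String) :
    resolve_block_label_py labels = pvChain labels := by
  unfold resolve_block_label_py
  by_cases hnil : labels = []
  · subst hnil; simp [pvChain]
  rw [if_neg hnil]
  unfold pvAFilter
  by_cases hc : ("KNOWLEDGE" ∈ PySem.Set.ofList labels) ∧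
      (pvRecipeLocal.any (fun r => decide (r ∈ PySem.Set.ofList labels)) = true)
  · obtain ⟨hk, hany⟩ := hc
    rw [if_pos ⟨hk, hany⟩, PySem.Set.remove?_of_mem hk, Option.getD_some, pv_scan_eq]
    obtain ⟨r, hr, hrs⟩ := List.any_eq_true.mp hany
    have hrl : r ∈ labels := (PySem.Set.mem_ofList labels r).mp (of_decide_eq_true hrs)
    have hdisj : "RECIPE_TITLE" ∈ labels ∨ "INGREDIENT_LINE" ∈ labels ∨
        "INSTRUCTION_LINE" ∈ labels ∨ "HOWTO_SECTION" ∈ labels ∨ "YIELD_LINE" ∈ labels ∨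
        "TIME_LINE" ∈ labels ∨ "RECIPE_NOTES" ∈ labels ∨ "RECIPE_VARIANT" ∈ labels := by
      simp only [pvRecipeLocal] at hr
      rcases (by simpa using hr : r = "RECIPE_TITLE" ∨ r = "INGREDIENT_LINE" ∨
          r = "INSTRUCTION_LINE" ∨ r = "HOWTO_SECTION" ∨ r = "YIELD_LINE" ∨ r = "TIME_LINE" ∨
          r = "RECIPE_NOTES" ∨ r = "RECIPE_VARIANT") with
        rfl | rfl | rfl | rfl | rfl | rfl | rfl | rfl <;> tauto
    simp only [PySem.Set.mem_discard, PySem.Set.mem_ofList, pvChain, ne_eq,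
      String.reduceEq, not_false_eq_true, and_true, and_false, if_false, not_true_eq_false]
    split_ifs <;> first
      | rfl
      | (rcases hdisj with h | h | h | h | h | h | h | h <;> exact absurd h (by assumption))
  · rw [if_neg hc, pv_scan_eq]
    simp only [PySem.Set.mem_ofList, pvChain]

-- ===== VERDICT (by name: the statement is the Claim_ definition above) =====
theorem resolve_block_label_py_spec : Claim_equal_resolve_block_label_py := by
  intro labels _
  unfold Spec_resolve_block_label_py
  rw [pv_A_eq_chain, pv_chain_eq, pv_alt_eq]
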